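-- pv_equiv track=rewrite | github.com/MelloMesh/Test | src/signals/cross_timeframe.py | get_optimal_entry_timeframe
-- ===== SOURCE A (Python) =====
-- from typing import Dict, List, Tuple, Optional
--
-- def get_optimal_entry_timeframe(
--
--     trends: Dict[str, str],
--     target_direction: str
-- ) -> Optional[str]:
--     """
--     Determine the optimal timeframe for entry based on trend alignment
--
--     Returns the smallest timeframe where all higher TFs are aligned
--     """
--     timeframe_hierarchy = ['2m', '5m', '15m', '30m']
--
--     for i, tf in enumerate(timeframe_hierarchy):
--         # Check if this TF and all higher TFs are aligned
--         higher_tfs = timeframe_hierarchy[i:]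
--
--         all_aligned = all(
--             trends.get(htf, 'unknown') == target_direction
--             for htf in higher_tfs
--         )
--
--         if all_aligned:
--             return tf
--
--     return None
-- ===== SOURCE B (Python) =====
-- def get_optimal_entry_timeframe(trends, target_direction):
--     """Forward pass recording the index of the LAST misaligned timeframe;
--     the answer is the next index in the hierarchy (None if past the end)."""
--     timeframe_hierarchy = ['2m', '5m', '15m', '30m']
--     last_bad = -1
--     for i, tf in enumerate(timeframe_hierarchy):
--         if trends.get(tf, 'unknown') != target_direction:
--             last_bad = i
--     if last_bad + 1 < len(timeframe_hierarchy):
--         return timeframe_hierarchy[last_bad + 1]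
--     return None
-- ===== Notes on version B (the rewrite author's own statement) =====
-- stated objective: simpler
-- what changed: Replaces A's loop re-checking all() over every suffix with one forward pass that records the index of the last misaligned timeframe and indexes the hierarchy at the next position.
import Mathlib
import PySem

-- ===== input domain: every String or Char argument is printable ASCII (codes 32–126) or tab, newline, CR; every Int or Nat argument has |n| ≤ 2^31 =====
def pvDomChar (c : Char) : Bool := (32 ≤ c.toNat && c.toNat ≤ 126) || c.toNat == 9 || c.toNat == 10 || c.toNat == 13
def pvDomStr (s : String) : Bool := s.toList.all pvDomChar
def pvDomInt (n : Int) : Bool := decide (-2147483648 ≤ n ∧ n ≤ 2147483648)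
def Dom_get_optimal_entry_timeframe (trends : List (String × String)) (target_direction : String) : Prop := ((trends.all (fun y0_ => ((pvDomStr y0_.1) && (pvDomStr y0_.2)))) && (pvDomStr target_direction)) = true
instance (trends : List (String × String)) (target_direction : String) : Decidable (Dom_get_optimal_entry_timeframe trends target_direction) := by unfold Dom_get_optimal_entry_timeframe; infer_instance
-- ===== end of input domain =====

-- B replaces the quadratic suffix re-checks with one forward pass tracking the last misaligned index; equivalence proved on all inputs.

-- ===== PORT A =====
def pvALoop (trends : List (String × String)) (target_direction : String) : List String → Option String
  | [] => none
  | tf :: rest =>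
    if (tf :: rest).all (fun htf => PySem.Dict.getD ⟨trends⟩ htf "unknown" == target_direction)
    then some tf
    else pvALoop trends target_direction rest

def get_optimal_entry_timeframe (trends : List (String × String)) (target_direction : String) : Option String :=
  pvALoop trends target_direction ["2m", "5m", "15m", "30m"]

-- ===== PORT B =====
def get_optimal_entry_timeframe_alt (trends : List (String × String)) (target_direction : String) : Option String :=
  let hierarchy : List String := ["2m", "5m", "15m", "30m"]
  let last_bad : Int :=
    (PySem.List.enumerate hierarchy).foldl
      (fun acc p =>
        if ¬ (PySem.Dict.getD ⟨trends⟩ p.2 "unknown" == target_direction) then p.1 else acc)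
      (-1)
  if last_bad + 1 < (hierarchy.length : Int)
  then PySem.List.pyGet? hierarchy (last_bad + 1)
  else none

-- ===== PRECONDITION & SPEC =====
def Spec_get_optimal_entry_timeframe (trends : List (String × String)) (target_direction : String) (out : Option String) : Prop := out = get_optimal_entry_timeframe_alt trends target_direction
instance (trends : List (String × String)) (target_direction : String) (out : Option String) : Decidable (Spec_get_optimal_entry_timeframe trends target_direction out) := by unfold Spec_get_optimal_entry_timeframe; infer_instance

-- ===== CLAIM (what is proved, stated in full; the proofs are below) =====
def Claim_equal_get_optimal_entry_timeframe : Prop := ∀ (trends : List (String × String)) (target_direction : String), Dom_get_optimal_entry_timeframe trends target_direction → Spec_get_optimal_entry_timeframe trends target_direction (get_optimal_entry_timeframe trends target_direction)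

-- ===== LEMMAS AND PROOFS =====

-- ===== VERDICT (by name: the statement is the Claim_ definition above) =====
theorem get_optimal_entry_timeframe_spec : Claim_equal_get_optimal_entry_timeframe := by
  intro trends td _
  unfold Spec_get_optimal_entry_timeframe get_optimal_entry_timeframe get_optimal_entry_timeframe_alt
  cases h2 : PySem.Dict.getD ⟨trends⟩ "2m" "unknown" == td <;>
  cases h5 : PySem.Dict.getD ⟨trends⟩ "5m" "unknown" == td <;>
  cases h15 : PySem.Dict.getD ⟨trends⟩ "15m" "unknown" == td <;>
  cases h30 : PySem.Dict.getD ⟨trends⟩ "30m" "unknown" == td <;>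
  simp [pvALoop, List.all, PySem.List.enumerate, h2, h5, h15, h30, PySem.List.pyGet?, PySem.List.pyIdx?] <;> simp_all
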